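-- pv_equiv track=rewrite | github.com/cyanjz/Coding_practice | Samsung_baekjoon/Samsung15/s15.py | ladder
-- ===== SOURCE A (Python) =====
-- def ladder(h, N, H):
--     start = [i for i in range(N)]
--     for k in range(H):
--         for b in h[k]:
--             # swaps
--             temp = start[b]
--             start[b] = start[b + 1]
--             start[b + 1] = temp
--     return start
-- ===== SOURCE B (Python) =====
-- def ladder(h, N, H):
--     result = [0] * N
--     for v in range(N):
--         col = v
--         for k in range(H):
--             for b in h[k]:
--                 if col == b:
--                     col = b + 1
--                 elif col == b + 1:
--                     col = b
--         result[col] = v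
--     return result
-- ===== Notes on version B (the rewrite author's own statement) =====
-- stated objective: alternative
-- what changed: Instead of mutating one shared identity array row by row (swapping adjacent cells), B traces each starting value's column independently through all rows and writes it into its final slot of a fresh result array.
-- outside the precondition, e.g. on ladder([[-1]], 2, 1): A returns [1, 0], B returns [0, 1]
import Mathlib
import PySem

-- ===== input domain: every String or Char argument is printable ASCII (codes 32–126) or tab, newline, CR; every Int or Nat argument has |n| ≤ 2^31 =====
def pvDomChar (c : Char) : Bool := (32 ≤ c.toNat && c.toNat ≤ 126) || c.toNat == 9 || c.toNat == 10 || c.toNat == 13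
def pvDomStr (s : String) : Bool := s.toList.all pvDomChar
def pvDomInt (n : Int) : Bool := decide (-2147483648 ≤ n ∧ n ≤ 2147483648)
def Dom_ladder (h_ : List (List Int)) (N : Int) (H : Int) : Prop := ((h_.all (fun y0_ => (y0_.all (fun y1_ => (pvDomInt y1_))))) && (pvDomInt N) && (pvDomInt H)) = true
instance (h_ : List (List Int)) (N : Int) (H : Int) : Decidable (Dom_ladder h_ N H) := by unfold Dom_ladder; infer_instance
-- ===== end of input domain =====

-- B traces each starting value's column independently instead of mutating one shared
-- identity array row by row; alternative decomposition, not faster.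

-- ===== PORT A =====
-- one swap: `temp = start[b]; start[b] = start[b+1]; start[b+1] = temp`
def ladderSwap (s : List Int) (b : Int) : List Int :=
  let temp := PySem.List.pyGetD s b 0
  let s1 := PySem.List.pySetD s b (PySem.List.pyGetD s (b + 1) 0)
  PySem.List.pySetD s1 (b + 1) temp

def ladder (h_ : List (List Int)) (N : Int) (H : Int) : List Int :=
  (PySem.List.pyRange 0 H 1).foldl
    (fun s k => (PySem.List.pyGetD h_ k []).foldl ladderSwap s)
    (PySem.List.pyRange 0 N 1)

-- ===== PORT B =====
-- `if col == b: col = b + 1  elif col == b + 1: col = b`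
def ladderStep (col b : Int) : Int :=
  if col = b then b + 1 else if col = b + 1 then b else col

def ladder_alt (h_ : List (List Int)) (N : Int) (H : Int) : List Int :=
  (PySem.List.pyRange 0 N 1).foldl
    (fun result v =>
      let col := (PySem.List.pyRange 0 H 1).foldl
        (fun col k => (PySem.List.pyGetD h_ k []).foldl ladderStep col) v
      PySem.List.pySetD result col v)
    (List.replicate N.toNat 0)

-- ===== PRECONDITION & SPEC =====
-- Pre_ excludes inputs where A raises IndexError (a processed row index ≥ len(h), or a rung b
-- with b+1 outside the array) and inputs with a NEGATIVE rung b, on which A returns only via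
-- Python's negative-index wraparound (outside the ladder's natural domain).
def Pre_ladder (h_ : List (List Int)) (N : Int) (H : Int) : Prop :=
  H ≤ (h_.length : Int) ∧ ∀ row ∈ h_.take H.toNat, ∀ b ∈ row, 0 ≤ b ∧ b + 1 < N
instance (h_ : List (List Int)) (N : Int) (H : Int) : Decidable (Pre_ladder h_ N H) := by
  unfold Pre_ladder; infer_instance
def pvWitness_ladder : List (List Int) × Int × Int := ([[0], [1, 0]], 3, 2)
def Spec_ladder (h_ : List (List Int)) (N : Int) (H : Int) (out : List Int) : Prop := out = ladder_alt h_ N H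
instance (h_ : List (List Int)) (N : Int) (H : Int) (out : List Int) : Decidable (Spec_ladder h_ N H out) := by unfold Spec_ladder; infer_instance

-- ===== CLAIM (what is proved, stated in full; the proofs are below) =====
def Claim_equal_ladder : Prop := ∀ (h_ : List (List Int)) (N : Int) (H : Int), Dom_ladder h_ N H → Pre_ladder h_ N H → Spec_ladder h_ N H (ladder h_ N H)

-- ===== LEMMAS AND PROOFS =====

-- B's per-value column trace, named for the proofs
def ladderTrace (h_ : List (List Int)) (H : Int) (v : Int) : Int :=
  (PySem.List.pyRange 0 H 1).foldl
    (fun col k => (PySem.List.pyGetD h_ k []).foldl ladderStep col) v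

theorem ladder_alt_eq_setfold (h_ : List (List Int)) (N H : Int) :
    ladder_alt h_ N H = (PySem.List.pyRange 0 N 1).foldl
      (fun r v => PySem.List.pySetD r (ladderTrace h_ H v) v) (List.replicate N.toNat 0) := rfl

-- a fold over range(H) reading h_[k] is a fold over the first H rows
theorem foldl_pyRange_getD {α : Type} (f : α → List Int → α) :
    ∀ (n : Nat) (xs : List (List Int)), n ≤ xs.length → ∀ (init : α),
    (PySem.List.pyRange 0 (n : Int) 1).foldl (fun a k => f a (PySem.List.pyGetD xs k [])) init
      = (xs.take n).foldl f init := by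
  intro n
  induction n with
  | zero => intro xs _ init; simp [PySem.List.pyRange_one_eq_nil]
  | succ n ih =>
      intro xs hn init
      have h1 : ((n : Int) + 1) = ((n + 1 : Nat) : Int) := by push_cast; ring
      rw [← h1, PySem.List.pyRange_one_succ_right (by positivity), List.foldl_append]
      have hlt : n < xs.length := by omega
      rw [List.take_add_one, List.foldl_append, ih xs (by omega) init]
      simp [PySem.List.pyGetD_natCast, List.getElem?_eq_getElem hlt]

theorem foldl_pyRange_getD' {α : Type} (f : α → List Int → α) (H : Int) (xs : List (List Int))
    (h0 : 0 ≤ H) (hH : H ≤ (xs.length : Int)) (init : α) :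
    (PySem.List.pyRange 0 H 1).foldl (fun a k => f a (PySem.List.pyGetD xs k [])) init
      = (xs.take H.toNat).foldl f init := by
  have hc : H = ((H.toNat : Nat) : Int) := by omega
  rw [hc, foldl_pyRange_getD f H.toNat xs (by omega) init]
  have h2 : ((H.toNat : Int)).toNat = H.toNat := by omega
  rw [h2]

theorem ladder_eq_flat (h_ : List (List Int)) (N H : Int) (hH : H ≤ (h_.length : Int)) :
    ladder h_ N H = ((h_.take H.toNat).flatten).foldl ladderSwap (PySem.List.pyRange 0 N 1) := by
  unfold ladder
  rw [List.foldl_flatten]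
  by_cases h : H ≤ 0
  · rw [PySem.List.pyRange_one_eq_nil h]
    have : H.toNat = 0 := by omega
    simp [this]
  · rw [foldl_pyRange_getD' _ H h_ (by omega) hH]

theorem trace_eq_flat (h_ : List (List Int)) (H : Int) (hH : H ≤ (h_.length : Int)) (c : Int) :
    ladderTrace h_ H c = ((h_.take H.toNat).flatten).foldl ladderStep c := by
  unfold ladderTrace
  rw [List.foldl_flatten]
  by_cases h : H ≤ 0
  · rw [PySem.List.pyRange_one_eq_nil h]
    have : H.toNat = 0 := by omega
    simp [this]
  · rw [foldl_pyRange_getD' _ H h_ (by omega) hH]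

theorem ladderSwap_length (s : List Int) (b : Int) : (ladderSwap s b).length = s.length := by
  simp [ladderSwap, PySem.List.length_pySetD]

theorem foldl_swap_length (ops : List Int) : ∀ s : List Int,
    (ops.foldl ladderSwap s).length = s.length := by
  induction ops with
  | nil => intro s; rfl
  | cons a ops ih => intro s; simp only [List.foldl_cons]; rw [ih, ladderSwap_length]

theorem ladderStep_bound {b c N : Int} (hb : 0 ≤ b ∧ b + 1 < N) (hc : 0 ≤ c ∧ c < N) :
    0 ≤ ladderStep c b ∧ ladderStep c b < N := by
  unfold ladderStep; split_ifs <;> omega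

theorem ladderStep_invol (c b : Int) : ladderStep (ladderStep c b) b = c := by
  unfold ladderStep; split_ifs <;> omega

-- one swap moves the value at column c to column `ladderStep c b`
theorem ladderSwap_get (s : List Int) (b c : Int) (hb : 0 ≤ b ∧ b + 1 < (s.length : Int))
    (hc : 0 ≤ c ∧ c < (s.length : Int)) :
    PySem.List.pyGetD (ladderSwap s b) (ladderStep c b) 0 = PySem.List.pyGetD s c 0 := by
  have hsb := ladderStep_bound hb hc
  unfold ladderSwap
  rw [PySem.List.pyGetD_eq_getElem _ 0 hb.1 (by omega),
      PySem.List.pyGetD_eq_getElem _ 0 (by omega : (0:Int) ≤ b + 1) hb.2,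
      PySem.List.pySetD_of_nonneg _ _ hb.1,
      PySem.List.pySetD_of_nonneg _ _ (by omega : (0:Int) ≤ b + 1),
      PySem.List.pyGetD_eq_getElem _ 0 hsb.1 (by simpa using hsb.2),
      PySem.List.pyGetD_eq_getElem _ 0 hc.1 hc.2]
  rw [List.getElem_set, List.getElem_set]
  by_cases h1 : c = b
  · subst h1
    simp [ladderStep]
  · by_cases h2 : c = b + 1
    · have hs : ladderStep c b = b := by unfold ladderStep; rw [if_neg h1, if_pos h2]
      simp only [hs]
      rw [if_neg (by omega : ¬ (b + 1).toNat = b.toNat)]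
      simp [h2]
    · have hs : ladderStep c b = c := by unfold ladderStep; rw [if_neg h1, if_neg h2]
      simp only [hs]
      rw [if_neg (by omega : ¬ (b + 1).toNat = c.toNat),
        if_neg (by omega : ¬ b.toNat = c.toNat)]

-- the fold invariant: the traced column of A's final array holds the start column's value
theorem foldl_swap_get (ops : List Int) : ∀ (s : List Int) (c : Int),
    (∀ b ∈ ops, 0 ≤ b ∧ b + 1 < (s.length : Int)) → 0 ≤ c → c < (s.length : Int) →
    PySem.List.pyGetD (ops.foldl ladderSwap s) (ops.foldl ladderStep c) 0
      = PySem.List.pyGetD s c 0 := by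
  induction ops with
  | nil => intro s c _ _ _; rfl
  | cons a ops ih =>
      intro s c hb hc0 hc1
      have ha := hb a List.mem_cons_self
      have hstep := ladderStep_bound ha ⟨hc0, hc1⟩
      have hlen : (ladderSwap s a).length = s.length := ladderSwap_length s a
      have hb' : ∀ b ∈ ops, 0 ≤ b ∧ b + 1 < ((ladderSwap s a).length : Int) := by
        intro b hbm; rw [hlen]; exact hb b (List.mem_cons_of_mem _ hbm)
      simp only [List.foldl_cons]
      rw [ih (ladderSwap s a) (ladderStep c a) hb' hstep.1 (by rw [hlen]; exact hstep.2),
        ladderSwap_get s a c ha ⟨hc0, hc1⟩]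

theorem ladderStep_bound_fold (ops : List Int) : ∀ (c N : Int),
    (∀ b ∈ ops, 0 ≤ b ∧ b + 1 < N) → 0 ≤ c → c < N →
    0 ≤ ops.foldl ladderStep c ∧ ops.foldl ladderStep c < N := by
  induction ops with
  | nil => intro c N _ h0 h1; exact ⟨h0, h1⟩
  | cons a ops ih =>
      intro c N hb h0 h1
      have hs := ladderStep_bound (hb a List.mem_cons_self) ⟨h0, h1⟩
      exact ih _ N (fun b hbm => hb b (List.mem_cons_of_mem _ hbm)) hs.1 hs.2

-- folding the reversed rung list undoes the trace
theorem trace_reverse_inv (ops : List Int) : ∀ c : Int,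
    ops.reverse.foldl ladderStep (ops.foldl ladderStep c) = c := by
  induction ops with
  | nil => intro c; rfl
  | cons a ops ih =>
      intro c
      simp only [List.reverse_cons, List.foldl_cons, List.foldl_append, List.foldl_nil]
      rw [ih (ladderStep c a), ladderStep_invol]

theorem trace_inv_reverse (ops : List Int) (c : Int) :
    ops.foldl ladderStep (ops.reverse.foldl ladderStep c) = c := by
  have := trace_reverse_inv ops.reverse c
  rwa [List.reverse_reverse] at this

-- the length of B's write-fold is the length of its initial array
theorem setfold_length (t : Int → Int) (l : List Int) : ∀ (init : List Int),
    (l.foldl (fun r v => PySem.List.pySetD r (t v) v) init).length = init.length := by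
  induction l with
  | nil => intro init; rfl
  | cons a l ih => intro init; simp only [List.foldl_cons]; rw [ih, PySem.List.length_pySetD]

-- reading an Int-cast index
theorem pyGetD_natIdx (xs : List Int) (j : Nat) (hj : j < xs.length) :
    PySem.List.pyGetD xs (j : Int) 0 = xs[j] := by
  rw [PySem.List.pyGetD_eq_getElem _ 0 (by omega) (by omega)]
  simp

theorem pyGetD_pyRange_zero (N c : Int) (h0 : 0 ≤ c) (h1 : c < N) :
    PySem.List.pyGetD (PySem.List.pyRange 0 N 1) c 0 = c := by
  rw [PySem.List.pyGetD_eq_getElem _ 0 h0 (by rw [PySem.List.length_pyRange_one]; omega),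
      PySem.List.getElem_pyRange_one]
  omega

-- B's write-fold puts v at column t v, provided t is injective and in range
theorem setfold_get (t : Int → Int) (L : Nat)
    (hrange : ∀ v : Int, 0 ≤ v → v < (L : Int) → 0 ≤ t v ∧ t v < (L : Int))
    (hinj : ∀ v w : Int, 0 ≤ v → v < (L : Int) → 0 ≤ w → w < (L : Int) → t v = t w → v = w) :
    ∀ (n : Nat), n ≤ L → ∀ (init : List Int), init.length = L → ∀ (v : Int), 0 ≤ v → v < (n : Int) →
    PySem.List.pyGetD
        ((PySem.List.pyRange 0 (n : Int) 1).foldl (fun r v => PySem.List.pySetD r (t v) v) init)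
        (t v) 0 = v := by
  intro n
  induction n with
  | zero => intro _ init _ v h0 h1; exfalso; omega
  | succ n ih =>
      intro hn init hlen v h0 h1
      have h1' : ((n : Int) + 1) = ((n + 1 : Nat) : Int) := by push_cast; ring
      rw [← h1', PySem.List.pyRange_one_succ_right (by positivity), List.foldl_append,
        List.foldl_cons, List.foldl_nil]
      have hFlen : ((PySem.List.pyRange 0 (n : Int) 1).foldl
          (fun r v => PySem.List.pySetD r (t v) v) init).length = L := by
        rw [setfold_length]; exact hlen
      have htn := hrange (n : Int) (by positivity) (by omega)
      have htv := hrange v h0 (by omega)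
      rw [PySem.List.pySetD_of_nonneg _ _ htn.1,
        PySem.List.pyGetD_eq_getElem _ 0 htv.1 (by rw [List.length_set, hFlen]; omega),
        List.getElem_set]
      by_cases hv : v = (n : Int)
      · subst hv; simp
      · have hne : t v ≠ t (n : Int) := by
          intro he; exact hv (hinj v (n : Int) h0 (by omega) (by positivity) (by omega) he)
        have hne' : (t (n:Int)).toNat ≠ (t v).toNat := by omega
        rw [if_neg hne']
        have hrec := ih (by omega) init hlen v h0 (by omega)
        rw [PySem.List.pyGetD_eq_getElem _ 0 htv.1 (by rw [hFlen]; omega)] at hrec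
        exact hrec

-- ===== VERDICT (by name: the statement is the Claim_ definition above) =====
theorem ladder_spec : Claim_equal_ladder := by
  intro h_ N H _ hpre
  obtain ⟨hH, hrow⟩ := hpre
  unfold Spec_ladder
  rw [ladder_eq_flat h_ N H hH, ladder_alt_eq_setfold]
  have hb : ∀ b ∈ (h_.take H.toNat).flatten, 0 ≤ b ∧ b + 1 < N := by
    intro b hbm
    rw [List.mem_flatten] at hbm
    obtain ⟨row, hr, hbr⟩ := hbm
    exact hrow row hr b hbr
  have hs0len : (PySem.List.pyRange 0 N 1).length = N.toNat := by
    rw [PySem.List.length_pyRange_one]; omega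
  have hbs : ∀ b ∈ (h_.take H.toNat).flatten,
      0 ≤ b ∧ b + 1 < ((PySem.List.pyRange 0 N 1).length : Int) := by
    intro b hbm; have := hb b hbm; rw [hs0len]; omega
  have hteq : ∀ v : Int, ladderTrace h_ H v = ((h_.take H.toNat).flatten).foldl ladderStep v :=
    trace_eq_flat h_ H hH
  have htrange : ∀ v : Int, 0 ≤ v → v < (N.toNat : Int) →
      0 ≤ ladderTrace h_ H v ∧ ladderTrace h_ H v < (N.toNat : Int) := by
    intro v h0 h1
    rw [hteq]
    have hN : 0 < N := by omega
    have := ladderStep_bound_fold ((h_.take H.toNat).flatten) v N hb h0 (by omega)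
    constructor <;> omega
  have htinj : ∀ v w : Int, 0 ≤ v → v < (N.toNat : Int) → 0 ≤ w → w < (N.toNat : Int) →
      ladderTrace h_ H v = ladderTrace h_ H w → v = w := by
    intro v w _ _ _ _ he
    rw [hteq, hteq] at he
    have hv := trace_reverse_inv ((h_.take H.toNat).flatten) v
    have hw := trace_reverse_inv ((h_.take H.toNat).flatten) w
    rw [he] at hv; rw [hv] at hw; exact hw
  apply List.ext_getElem
  · rw [foldl_swap_length, hs0len, setfold_length, List.length_replicate]
  intro j hj1 hj2
  rw [foldl_swap_length, hs0len] at hj1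
  have hN : 0 < N := by omega
  -- the unique starting value landing at column j
  have hcb : 0 ≤ ((h_.take H.toNat).flatten).reverse.foldl ladderStep (j : Int) ∧
      ((h_.take H.toNat).flatten).reverse.foldl ladderStep (j : Int) < N := by
    apply ladderStep_bound_fold
    · intro b hbm; exact hb b (List.mem_reverse.mp hbm)
    · omega
    · omega
  have htc : ((h_.take H.toNat).flatten).foldl ladderStep
      (((h_.take H.toNat).flatten).reverse.foldl ladderStep (j : Int)) = (j : Int) :=
    trace_inv_reverse _ _
  have htc' : ladderTrace h_ H (((h_.take H.toNat).flatten).reverse.foldl ladderStep (j : Int))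
      = (j : Int) := by rw [hteq]; exact htc
  -- A side
  have hgA := foldl_swap_get ((h_.take H.toNat).flatten) (PySem.List.pyRange 0 N 1)
    (((h_.take H.toNat).flatten).reverse.foldl ladderStep (j : Int)) hbs hcb.1
    (by rw [hs0len]; omega)
  rw [htc, pyGetD_natIdx _ j (by rw [foldl_swap_length, hs0len]; omega),
    pyGetD_pyRange_zero N _ hcb.1 hcb.2] at hgA
  -- B side
  have hgB := setfold_get (ladderTrace h_ H) N.toNat htrange htinj N.toNat le_rfl
    (List.replicate N.toNat 0) (by simp)
    (((h_.take H.toNat).flatten).reverse.foldl ladderStep (j : Int)) hcb.1 (by omega)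
  have hcast : ((N.toNat : Nat) : Int) = N := by omega
  rw [hcast, htc', pyGetD_natIdx _ j (by rw [setfold_length, List.length_replicate]; omega)] at hgB
  rw [hgA, ← hgB]
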